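-- pv_equiv track=rewrite | github.com/austin-py/337---Project-1-Twitter | get_winners.py | an_award_name
-- ===== SOURCE A (Python) =====
-- def an_award_name(cand, text):
--     cand_list = cand.split()
--     bool_vec = cand_list
--     for word in cand_list:
--         for award in text:
--             if word not in award.split():
--                 continue
--             else:
--                 bool_vec[cand_list.index(word)] = True
--                 break
--     for e in bool_vec:
--         if not isinstance(e, bool):
--             return False
--     return True
-- ===== SOURCE B (Python) =====
-- def an_award_name(cand, text):
--     tokens = set()
--     for award in text:
--         tokens.update(award.split())
--     return set(cand.split()).issubset(tokens)
-- ===== Notes on version B (the rewrite author's own statement) =====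
-- stated objective: idiomatic
-- what changed: Replaces the mutated bool_vec table (aliased to cand_list) with per-word rescans of every award and .index calls by one token-set index built in a single pass over text followed by a set subset test.
import Mathlib
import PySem

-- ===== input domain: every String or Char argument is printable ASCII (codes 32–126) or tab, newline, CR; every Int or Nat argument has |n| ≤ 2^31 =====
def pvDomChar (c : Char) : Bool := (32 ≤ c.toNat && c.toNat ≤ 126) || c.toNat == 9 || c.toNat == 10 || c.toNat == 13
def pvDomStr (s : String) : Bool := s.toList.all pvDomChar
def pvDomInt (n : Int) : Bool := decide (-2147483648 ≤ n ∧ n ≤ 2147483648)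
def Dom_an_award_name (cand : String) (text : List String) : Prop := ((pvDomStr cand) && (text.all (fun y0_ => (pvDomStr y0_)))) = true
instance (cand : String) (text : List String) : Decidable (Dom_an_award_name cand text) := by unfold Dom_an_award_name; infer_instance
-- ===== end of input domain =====

-- B replaces A's mutated bool_vec table (aliased to cand_list) and per-word award rescans
-- by one token-set index over text plus a subset test (idiomatic; return value only).

-- ===== PORT A =====
-- bool_vec aliases cand_list, so cells hold either the original string or True;
-- modelled as List (Option String) with none = True.
def pvReplaceFirst : List (Option String) → String → List (Option String)
  | [], _ => []
  | x :: xs, w => if x = some w then none :: xs else x :: pvReplaceFirst xs w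

-- one iteration of the outer 'for word in cand_list' loop: the loop reads the CURRENT
-- (mutated) list at index i; if it is still a string, the inner 'for award in text'
-- finds the first award whose split contains it and sets bool_vec[cand_list.index(word)] = True.
def pvStepA (text : List String) (st : List (Option String)) (i : Nat) : List (Option String) :=
  match st[i]? with
  | some (some word) =>
    match text.find? (fun award => (PySem.Str.split₀ award).contains word) with
    | some _ => pvReplaceFirst st word
    | none => st
  | _ => st

def an_award_name (cand : String) (text : List String) : Bool :=
  let candList := PySem.Str.split₀ cand
  let final := (List.range candList.length).foldl (pvStepA text) (candList.map some)
  final.all Option.isNone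

-- ===== PORT B =====
def an_award_name_alt (cand : String) (text : List String) : Bool :=
  let tokens := text.foldl (fun s award => PySem.Set.update s (PySem.Str.split₀ award)) PySem.Set.empty
  PySem.Set.issubset (PySem.Set.ofList (PySem.Str.split₀ cand)) tokens

-- ===== PRECONDITION & SPEC =====
def Spec_an_award_name (cand : String) (text : List String) (out : Bool) : Prop := out = an_award_name_alt cand text
instance (cand : String) (text : List String) (out : Bool) : Decidable (Spec_an_award_name cand text out) := by unfold Spec_an_award_name; infer_instance

-- ===== CLAIM (what is proved, stated in full; the proofs are below) =====
def Claim_equal_an_award_name : Prop := ∀ (cand : String) (text : List String), Dom_an_award_name cand text → Spec_an_award_name cand text (an_award_name cand text)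

-- ===== LEMMAS AND PROOFS =====

-- a word found in some award: the inner-loop search succeeds
def pvFound (text : List String) (w : String) : Bool :=
  (text.find? (fun award => (PySem.Str.split₀ award).contains w)).isSome

lemma pvReplaceFirst_append (pre tl : List (Option String)) (w : String)
    (h : some w ∉ pre) :
    pvReplaceFirst (pre ++ some w :: tl) w = pre ++ none :: tl := by
  induction pre with
  | nil => simp [pvReplaceFirst]
  | cons x xs ih =>
    simp only [List.mem_cons, not_or] at h
    simp only [List.cons_append, pvReplaceFirst]
    rw [if_neg (fun hh => h.1 hh.symm), ih h.2]

-- loop invariant: processed prefix holds none for found words, some w for unfound ones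
lemma pvLoop_inv (text : List String) :
    ∀ (suf : List String) (pre : List (Option String)),
    (∀ w, some w ∈ pre → pvFound text w = false) →
    (List.range' pre.length suf.length).foldl (pvStepA text) (pre ++ suf.map some)
      = pre ++ suf.map (fun w => if pvFound text w then none else some w) := by
  intro suf
  induction suf with
  | nil => intro pre _; simp
  | cons w rest ih =>
    intro pre hpre
    have hlen : (w :: rest).length = rest.length + 1 := rfl
    rw [hlen, List.range'_succ, List.foldl_cons]
    have hget : (pre ++ (w :: rest).map some)[pre.length]? = some (some w) := by
      rw [List.getElem?_append_right (le_refl _)]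
      simp
    by_cases hf : pvFound text w = true
    · obtain ⟨a, ha⟩ := Option.isSome_iff_exists.mp hf
      have hnot : some w ∉ pre := fun hmem => by
        have := hpre w hmem
        rw [hf] at this; exact Bool.true_eq_false.mp this
      have hstep : pvStepA text (pre ++ (w :: rest).map some) pre.length
          = (pre ++ [none]) ++ rest.map some := by
        simp only [pvStepA, hget]
        rw [show ((w :: rest).map some : List (Option String)) = some w :: rest.map some from rfl] at *
        rw [ha]
        rw [pvReplaceFirst_append pre (rest.map some) w hnot]
        simp
      rw [hstep]
      have hpre' : ∀ w', some w' ∈ pre ++ [none] → pvFound text w' = false := by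
        intro w' hm
        rcases List.mem_append.mp hm with h1 | h1
        · exact hpre w' h1
        · simp at h1
      have := ih (pre ++ [none]) hpre'
      rw [List.length_append, List.length_cons, List.length_nil] at this
      rw [this]
      simp [hf]
    · have hf' : pvFound text w = false := by
        cases h : pvFound text w
        · rfl
        · exact absurd h hf
      have hnone : text.find? (fun award => (PySem.Str.split₀ award).contains w) = none := by
        unfold pvFound at hf'
        exact Option.not_isSome_iff_eq_none.mp (fun hcon => Bool.false_ne_true (hf' ▸ hcon))
      have hstep : pvStepA text (pre ++ (w :: rest).map some) pre.length
          = (pre ++ [some w]) ++ rest.map some := by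
        simp only [pvStepA, hget, hnone]
        simp
      rw [hstep]
      have hpre' : ∀ w', some w' ∈ pre ++ [some w] → pvFound text w' = false := by
        intro w' hm
        rcases List.mem_append.mp hm with h1 | h1
        · exact hpre w' h1
        · simp at h1; subst h1; exact hf'
      have := ih (pre ++ [some w]) hpre'
      rw [List.length_append, List.length_cons, List.length_nil] at this
      rw [this]
      simp [hf']

lemma pvA_iff (cand : String) (text : List String) :
    an_award_name cand text = true ↔
      ∀ w ∈ PySem.Str.split₀ cand, pvFound text w = true := by
  unfold an_award_name
  have h := pvLoop_inv text (PySem.Str.split₀ cand) [] (by simp)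
  simp only [List.length_nil, List.nil_append] at h ⊢
  rw [← List.range_eq_range'] at h
  rw [show (PySem.Str.split₀ cand).length = ((PySem.Str.split₀ cand).map some).length by simp,
      show List.range ((PySem.Str.split₀ cand).map some).length
        = List.range (PySem.Str.split₀ cand).length by simp]
  rw [h]
  simp only [List.all_map, List.all_eq_true, Function.comp]
  constructor
  · intro hall w hw
    have := hall w hw
    by_cases hf : pvFound text w = true
    · exact hf
    · simp [hf] at this
  · intro hall w hw
    simp [hall w hw]

-- membership in the token index built by B's first loop
lemma pvTokens_mem (text : List String) :
    ∀ (s : PySem.Set String) (x : String),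
      (x ∈ text.foldl (fun s award => PySem.Set.update s (PySem.Str.split₀ award)) s)
        ↔ x ∈ s ∨ ∃ aw ∈ text, x ∈ PySem.Str.split₀ aw := by
  intro s x
  induction text generalizing s with
  | nil => simp
  | cons a t ih =>
    simp only [List.foldl_cons, ih, PySem.Set.mem_update, List.mem_cons]
    constructor
    · rintro ((h | h) | ⟨aw, haw, hx⟩)
      · exact Or.inl h
      · exact Or.inr ⟨a, Or.inl rfl, h⟩
      · exact Or.inr ⟨aw, Or.inr haw, hx⟩
    · rintro (h | ⟨aw, (rfl | haw), hx⟩)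
      · exact Or.inl (Or.inl h)
      · exact Or.inl (Or.inr hx)
      · exact Or.inr ⟨aw, haw, hx⟩

lemma pvB_iff (cand : String) (text : List String) :
    an_award_name_alt cand text = true ↔
      ∀ w ∈ PySem.Str.split₀ cand, pvFound text w = true := by
  unfold an_award_name_alt
  rw [PySem.Set.issubset_iff]
  constructor
  · intro h w hw
    have hm := h w (by rw [PySem.Set.mem_ofList]; exact hw)
    rw [pvTokens_mem] at hm
    rcases hm with h0 | ⟨aw, haw, hx⟩
    · simp [PySem.Set.empty] at h0
    · unfold pvFound
      exact List.find?_isSome.mpr ⟨aw, haw, by simpa using hx⟩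
  · intro h x hx
    rw [PySem.Set.mem_ofList] at hx
    have hf := h x hx
    unfold pvFound at hf
    obtain ⟨a, ha⟩ := Option.isSome_iff_exists.mp hf
    have := List.find?_some ha
    have hmem := List.mem_of_find?_eq_some ha
    rw [pvTokens_mem]
    exact Or.inr ⟨a, hmem, by simpa [List.contains_iff_mem] using this⟩

-- ===== VERDICT (by name: the statement is the Claim_ definition above) =====
theorem an_award_name_spec : Claim_equal_an_award_name := by
  intro cand text _
  unfold Spec_an_award_name
  have hA := pvA_iff cand text
  have hB := pvB_iff cand text
  cases ha : an_award_name cand text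
  · cases hb : an_award_name_alt cand text
    · rfl
    · exact absurd (hA.mpr (hB.mp hb)) (by simp [ha])
  · exact (hB.mpr (hA.mp ha)).symm
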